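-- pv_equiv track=rewrite | github.com/AmanouToona/devotion | ABC247_E.py | count
-- ===== SOURCE A (Python) =====
-- def count(A, x, y):
--     cnt_x = [0] * (len(A) + 1)
--     cnt_y = [0] * (len(A) + 1)
--
--     for i, a in enumerate(A):
--         if a == x:
--             cnt_x[i + 1] = 1
--         if a == y:
--             cnt_y[i + 1] = 1
--
--     for i in range(len(A)):
--         cnt_x[i + 1] += cnt_x[i]
--         cnt_y[i + 1] += cnt_y[i]
--
--     res = 0
--     right = 0
--     for left in range(len(cnt_x)):
--         while cnt_x[left] == cnt_x[right] and right + 1 < len(cnt_x):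
--             right += 1
--         while cnt_y[left] == cnt_y[right] and right + 1 < len(cnt_y):
--             right += 1
--
--         if cnt_x[left] == cnt_x[right] or cnt_y[left] == cnt_y[right]:
--             return res
--
--         res += len(cnt_x) - right
--
--     return res
-- ===== SOURCE B (Python) =====
-- def count(A, x, y):
--     last_x = -1
--     last_y = -1
--     total = 0
--     for r, a in enumerate(A):
--         if a == x:
--             last_x = r
--         if a == y:
--             last_y = r
--         if last_x >= 0 and last_y >= 0:
--             total += min(last_x, last_y) + 1
--     return total
-- ===== Notes on version B (the rewrite author's own statement) =====
-- stated objective: faster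
-- what changed: Replaces A's two prefix-count arrays plus a two-pointer sweep over left endpoints by a single forward pass that tracks the most recent indices of x and y and adds min(last_x,last_y)+1 per position.
import Mathlib
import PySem

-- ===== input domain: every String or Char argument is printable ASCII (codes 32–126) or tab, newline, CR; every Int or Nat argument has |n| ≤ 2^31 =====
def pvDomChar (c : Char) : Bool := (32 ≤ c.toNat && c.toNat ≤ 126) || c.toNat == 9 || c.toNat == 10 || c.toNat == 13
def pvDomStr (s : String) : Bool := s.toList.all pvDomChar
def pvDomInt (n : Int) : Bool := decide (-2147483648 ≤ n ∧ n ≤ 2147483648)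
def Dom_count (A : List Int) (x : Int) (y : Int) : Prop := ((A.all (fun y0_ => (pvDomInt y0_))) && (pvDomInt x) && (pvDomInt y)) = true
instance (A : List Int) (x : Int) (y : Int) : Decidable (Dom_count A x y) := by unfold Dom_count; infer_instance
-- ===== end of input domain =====

-- B replaces A's prefix-count arrays and two-pointer sweep by a single forward pass
-- tracking the latest indices of x and y (one pass, no arrays: measurably faster by a constant factor).



-- ===== PORT A =====

-- first Python loop: 'if a == x: cnt_x[i+1] = 1' (and same for y); the enumerate index is ≥ 0, so .toNat is exact

def pvStep1 (x y : Int) (s : List Int × List Int) (p : Int × Int) : List Int × List Int :=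
  let s1 := if p.2 = x then (s.1.set (p.1 + 1).toNat 1, s.2) else s
  if p.2 = y then (s1.1, s1.2.set (p.1 + 1).toNat 1) else s1

-- second Python loop: 'cnt[i+1] += cnt[i]'; all indices are in range, so getD is exact

def pvStep2 (s : List Int × List Int) (i : Nat) : List Int × List Int :=
  (s.1.set (i + 1) (s.1.getD (i + 1) 0 + s.1.getD i 0),
   s.2.set (i + 1) (s.2.getD (i + 1) 0 + s.2.getD i 0))

-- 'while cnt[left] == cnt[right] and right + 1 < len(cnt): right += 1' (v = cnt[left]; in-range index, getD exact)

def pvAdv (cnt : List Int) (v : Int) (right : Nat) : Nat :=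
  if cnt.getD right 0 = v ∧ right + 1 < cnt.length then pvAdv cnt v (right + 1) else right
termination_by cnt.length - right
decreasing_by omega

-- 'for left in range(len(cnt_x)): …' with the early return

def pvLoop (cx cy : List Int) (left right : Nat) (res : Int) : Int :=
  if left < cx.length then
    let r1 := pvAdv cx (cx.getD left 0) right
    let r2 := pvAdv cy (cy.getD left 0) r1
    if cx.getD left 0 = cx.getD r2 0 ∨ cy.getD left 0 = cy.getD r2 0 then res
    else pvLoop cx cy (left + 1) r2 (res + ((cx.length : Int) - (r2 : Int)))
  else res
termination_by cx.length - left

def count (A : List Int) (x : Int) (y : Int) : Int :=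
  let n := A.length
  let c0 := (List.replicate (n + 1) (0 : Int), List.replicate (n + 1) (0 : Int))
  let c1 := (PySem.List.enumerate A 0).foldl (pvStep1 x y) c0
  let c2 := (List.range n).foldl pvStep2 c1
  pvLoop c2.1 c2.2 0 0 0

-- ===== PORT B =====

def pvStepB (x y : Int) (s : Int × Int × Int) (p : Int × Int) : Int × Int × Int :=
  let lx := if p.2 = x then p.1 else s.1
  let ly := if p.2 = y then p.1 else s.2.1
  let tot := if 0 ≤ lx ∧ 0 ≤ ly then s.2.2 + (min lx ly + 1) else s.2.2
  (lx, ly, tot)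

def count_alt (A : List Int) (x : Int) (y : Int) : Int :=
  ((PySem.List.enumerate A 0).foldl (pvStepB x y) (-1, -1, 0)).2.2

-- ===== PRECONDITION & SPEC =====

def Spec_count (A : List Int) (x : Int) (y : Int) (out : Int) : Prop := out = count_alt A x y

instance (A : List Int) (x : Int) (y : Int) (out : Int) : Decidable (Spec_count A x y out) := by unfold Spec_count; infer_instance

-- ===== CLAIM (what is proved, stated in full; the proofs are below) =====

def Claim_equal_count : Prop := ∀ (A : List Int) (x : Int) (y : Int), Dom_count A x y → Spec_count A x y (count A x y)

-- ===== LEMMAS AND PROOFS =====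

-- pc A v i = number of occurrences of v among the first i elements of A (Python's cnt arrays)
def pc (A : List Int) (v : Int) (i : Nat) : Int := ((A.take i).countP (· == v) : Int)

theorem pc_mono (A : List Int) (v : Int) {i j : Nat} (h : i ≤ j) : pc A v i ≤ pc A v j := by
  unfold pc
  have h1 : A.take i = (A.take j).take i := by rw [List.take_take, Nat.min_eq_left h]
  rw [h1]
  exact_mod_cast List.Sublist.countP_le (p := (· == v)) (List.take_sublist _ _)

theorem pc_succ (A : List Int) (v : Int) {i : Nat} (h : i < A.length) :
    pc A v (i + 1) = pc A v i + (if A.getD i 0 = v then 1 else 0) := by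
  unfold pc
  rw [List.take_add_one, List.countP_append, List.getElem?_eq_getElem h]
  simp [List.getD, List.countP_cons, List.getElem?_eq_getElem h]

theorem pc_zero (A : List Int) (v : Int) : pc A v 0 = 0 := by simp [pc]

theorem pc_nonneg (A : List Int) (v : Int) (i : Nat) : 0 ≤ pc A v i := by simp [pc]

def gx (x : Int) (c : List Int) (p : Int × Int) : List Int :=
  if p.2 = x then c.set (p.1 + 1).toNat 1 else c

theorem build1 (x : Int) : ∀ (L pre : List Int),
    (PySem.List.enumerate L ((pre.length : Int) - 1)).foldl (gx x)
      (pre ++ List.replicate L.length 0)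
    = pre ++ L.map (fun a => if a = x then (1 : Int) else 0) := by
  intro L
  induction L with
  | nil => intro pre; simp [PySem.List.enumerate_nil]
  | cons a L ih =>
    intro pre
    rw [PySem.List.enumerate_cons, List.length_cons, List.replicate_succ, List.foldl_cons]
    have hset : gx x (pre ++ 0 :: List.replicate L.length 0) ((pre.length : Int) - 1, a)
        = (pre ++ [if a = x then (1 : Int) else 0]) ++ List.replicate L.length 0 := by
      unfold gx
      split_ifs with h
      · have h1 : (((pre.length : Int) - 1) + 1).toNat = pre.length := by omega
        simp only [h1]
        rw [List.set_append_right _ _ (le_refl _)]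
        simp
      · simp
    rw [hset]
    have hstart : (pre.length : Int) - 1 + 1 = (((pre ++ [if a = x then (1 : Int) else 0]).length : Int)) - 1 := by
      simp
    rw [hstart, ih]
    simp

def h2 (c : List Int) (i : Nat) : List Int :=
  c.set (i + 1) (c.getD (i + 1) 0 + c.getD i 0)

theorem build2 (A : List Int) (x : Int) : ∀ i, i ≤ A.length →
    (List.range i).foldl h2 ((0 : Int) :: A.map (fun a => if a = x then (1 : Int) else 0))
    = (List.range (i + 1)).map (pc A x) ++ (A.drop i).map (fun a => if a = x then (1 : Int) else 0) := by
  intro i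
  induction i with
  | zero => intro _; simp [pc]
  | succ i ih =>
    intro hi
    rw [List.range_succ, List.foldl_append, List.foldl_cons, List.foldl_nil, ih (by omega)]
    have hlen : ((List.range (i + 1)).map (pc A x)).length = i + 1 := by simp
    have hdrop : A.drop i = A.getD i 0 :: A.drop (i + 1) := by
      rw [List.drop_eq_getElem_cons (by omega), List.getD_eq_getElem _ _ (by omega)]
    rw [hdrop]
    unfold h2
    rw [List.map_cons]
    set f := fun a => if a = x then (1 : Int) else 0 with hf
    set P := (List.range (i + 1)).map (pc A x) with hP
    have hg1 : (P ++ f (A.getD i 0) :: (A.drop (i + 1)).map f).getD (i + 1) 0 = f (A.getD i 0) := by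
      rw [List.getD_append_right _ _ _ _ (by omega)]
      simp [hlen]
    have hg2 : (P ++ f (A.getD i 0) :: (A.drop (i + 1)).map f).getD i 0 = pc A x i := by
      rw [List.getD_append _ _ _ _ (by omega)]
      rw [hP, List.getD_eq_getElem _ _ (by simp)]
      simp
    rw [hg1, hg2, List.set_append_right _ _ (by omega), hlen]
    have : i + 1 - (i + 1) = 0 := by omega
    rw [this, List.set_cons_zero]
    have hv : f (A.getD i 0) + pc A x i = pc A x (i + 1) := by
      rw [pc_succ A x (by omega), hf]
      ring
    rw [hv]
    rw [List.range_succ, List.map_append]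
    simp
    exact hP

theorem foldl_prod {α β γ : Type} (g : α → γ → α) (h : β → γ → β) (l : List γ) (a : α) (b : β) :
    l.foldl (fun s i => (g s.1 i, h s.2 i)) (a, b) = (l.foldl g a, l.foldl h b) := by
  induction l generalizing a b with
  | nil => rfl
  | cons p t ih => exact ih _ _

theorem step1_eq (x y : Int) : pvStep1 x y = fun s p => (gx x s.1 p, gx y s.2 p) := by
  funext s p
  unfold pvStep1 gx
  split_ifs <;> rfl

theorem step2_eq : pvStep2 = fun s i => (h2 s.1 i, h2 s.2 i) := rfl

theorem cnt_eq (A : List Int) (x y : Int) :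
    (List.range A.length).foldl pvStep2
      ((PySem.List.enumerate A 0).foldl (pvStep1 x y)
        (List.replicate (A.length + 1) (0 : Int), List.replicate (A.length + 1) (0 : Int)))
    = ((List.range (A.length + 1)).map (pc A x), (List.range (A.length + 1)).map (pc A y)) := by
  rw [step1_eq, step2_eq, foldl_prod, foldl_prod]
  have hrep : List.replicate (A.length + 1) (0 : Int) = [0] ++ List.replicate A.length 0 := by
    rw [List.replicate_succ]; rfl
  have hx0 : (PySem.List.enumerate A 0).foldl (gx x) (List.replicate (A.length + 1) (0 : Int))
      = (0 : Int) :: A.map (fun a => if a = x then (1 : Int) else 0) := by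
    have h := build1 x A [0]
    norm_num at h
    rw [hrep]
    exact h
  have hy0 : (PySem.List.enumerate A 0).foldl (gx y) (List.replicate (A.length + 1) (0 : Int))
      = (0 : Int) :: A.map (fun a => if a = y then (1 : Int) else 0) := by
    have h := build1 y A [0]
    norm_num at h
    rw [hrep]
    exact h
  rw [hx0, hy0, build2 A x A.length (le_refl _), build2 A y A.length (le_refl _)]
  simp

theorem adv_spec (cnt : List Int) (v : Int) : ∀ (right : Nat), right < cnt.length →
    right ≤ pvAdv cnt v right ∧ pvAdv cnt v right < cnt.length ∧
    (∀ r, right ≤ r → r < pvAdv cnt v right → cnt.getD r 0 = v) ∧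
    (cnt.getD (pvAdv cnt v right) 0 ≠ v ∨ pvAdv cnt v right = cnt.length - 1) := by
  intro right
  induction right using pvAdv.induct cnt v with
  | case1 right hcond ih =>
    intro _
    rw [pvAdv, if_pos hcond]
    obtain ⟨h1, h2, h3, h4⟩ := ih (by omega)
    refine ⟨by omega, h2, ?_, h4⟩
    intro r hr1 hr2
    rcases Nat.eq_or_lt_of_le hr1 with h | h
    · exact h ▸ hcond.1
    · exact h3 r h hr2
  | case2 right hcond =>
    intro hlt
    rw [pvAdv, if_neg hcond]
    refine ⟨le_refl _, hlt, by omega, ?_⟩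
    by_cases he : cnt.getD right 0 = v
    · right; omega
    · left; exact he

def Tcnt (A : List Int) (x y : Int) (l : Nat) : Nat :=
  ((Finset.range (A.length + 1)).filter
    (fun r => pc A x l < pc A x r ∧ pc A y l < pc A y r)).card

theorem getD_CX (A : List Int) (x : Int) {i : Nat} (h : i < A.length + 1) :
    ((List.range (A.length + 1)).map (pc A x)).getD i 0 = pc A x i := by
  rw [List.getD_eq_getElem _ _ (by simpa using h)]
  simp

theorem len_CX (A : List Int) (x : Int) :
    ((List.range (A.length + 1)).map (pc A x)).length = A.length + 1 := by simp

theorem T_zero_of_max (A : List Int) (x y : Int) {left : Nat}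
    (h : pc A x A.length = pc A x left ∨ pc A y A.length = pc A y left) :
    ∀ l, left ≤ l → Tcnt A x y l = 0 := by
  intro l hl
  unfold Tcnt
  rw [Finset.card_eq_zero, Finset.filter_eq_empty_iff]
  intro r hr
  rw [Finset.mem_range] at hr
  have hxl := pc_mono A x hl
  have hyl := pc_mono A y hl
  have hxr := pc_mono A x (show r ≤ A.length by omega)
  have hyr := pc_mono A y (show r ≤ A.length by omega)
  rcases h with h | h
  · intro hc; omega
  · intro hc; omega

theorem pvLoop_unfold (cx cy : List Int) (left right : Nat) (res : Int) (h : left < cx.length) :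
    pvLoop cx cy left right res =
    (if cx.getD left 0 = cx.getD (pvAdv cy (cy.getD left 0) (pvAdv cx (cx.getD left 0) right)) 0
        ∨ cy.getD left 0 = cy.getD (pvAdv cy (cy.getD left 0) (pvAdv cx (cx.getD left 0) right)) 0 then res
     else pvLoop cx cy (left + 1) (pvAdv cy (cy.getD left 0) (pvAdv cx (cx.getD left 0) right))
            (res + ((cx.length : Int) - ((pvAdv cy (cy.getD left 0) (pvAdv cx (cx.getD left 0) right) : Nat) : Int)))) := by
  rw [pvLoop, if_pos h]

theorem loop_spec (A : List Int) (x y : Int) : ∀ (k left right : Nat) (res : Int),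
    A.length + 1 - left ≤ k → left < A.length + 1 → right < A.length + 1 → left ≤ right →
    (∀ r, r < right → ¬(pc A x left < pc A x r ∧ pc A y left < pc A y r)) →
    pvLoop ((List.range (A.length + 1)).map (pc A x)) ((List.range (A.length + 1)).map (pc A y))
      left right res
    = res + ∑ l ∈ Finset.Ico left (A.length + 1), (Tcnt A x y l : Int) := by
  intro k
  induction k with
  | zero => intro left right res hk h1; omega
  | succ k ih =>
    intro left right res hk h1 h2 h3 h4
    set CX := (List.range (A.length + 1)).map (pc A x) with hCXdef
    set CY := (List.range (A.length + 1)).map (pc A y) with hCYdef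
    have hlenX : CX.length = A.length + 1 := len_CX A x
    have hlenY : CY.length = A.length + 1 := len_CX A y
    rw [pvLoop_unfold CX CY left right res (by omega)]
    set r1 := pvAdv CX (CX.getD left 0) right with hr1def
    set r2 := pvAdv CY (CY.getD left 0) r1 with hr2def
    obtain ⟨o11, o12, o13, o14⟩ := adv_spec CX (CX.getD left 0) right (by omega)
    obtain ⟨o21, o22, o23, o24⟩ := adv_spec CY (CY.getD left 0) r1 (by omega)
    rw [← hr1def] at o11 o12 o13 o14
    rw [← hr2def] at o21 o22 o23 o24
    rw [hlenX] at o12 o14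
    rw [hlenY] at o22 o24
    have g1 : CX.getD left 0 = pc A x left := getD_CX A x (by omega)
    have g2 : CX.getD r1 0 = pc A x r1 := getD_CX A x (by omega)
    have g3 : CX.getD r2 0 = pc A x r2 := getD_CX A x (by omega)
    have g4 : CY.getD left 0 = pc A y left := getD_CX A y (by omega)
    have g5 : CY.getD r2 0 = pc A y r2 := getD_CX A y (by omega)
    have hx1 : pc A x left ≤ pc A x r1 := pc_mono A x (by omega)
    have hx2 : pc A x r1 ≤ pc A x r2 := pc_mono A x (by omega)
    by_cases hret : pc A x left = pc A x r2 ∨ pc A y left = pc A y r2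
    · rw [if_pos (by rw [g1, g3, g4, g5]; exact hret)]
      have hmax : pc A x A.length = pc A x left ∨ pc A y A.length = pc A y left := by
        rcases hret with h | h
        · left
          have hr1eq : pc A x r1 = pc A x left := by omega
          have hr1n : r1 = A.length := by
            rcases o14 with hne | hend
            · exfalso; rw [g2, g1] at hne; exact hne hr1eq
            · omega
          have hr2n : r2 = A.length := by omega
          rw [← hr2n]; exact h.symm
        · right
          have hr2n : r2 = A.length := by
            rcases o24 with hne | hend
            · exfalso; rw [g5, g4] at hne; exact hne h.symm
            · omega
          rw [← hr2n]; exact h.symm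
      have hz : ∑ l ∈ Finset.Ico left (A.length + 1), (Tcnt A x y l : Int) = 0 := by
        apply Finset.sum_eq_zero
        intro l hl
        rw [Finset.mem_Ico] at hl
        rw [T_zero_of_max A x y hmax l hl.1]
        rfl
      omega
    · rw [if_neg (by rw [g1, g3, g4, g5]; exact hret)]
      push Not at hret
      obtain ⟨hretx, hrety⟩ := hret
      have hx : pc A x left < pc A x r2 := by omega
      have hy : pc A y left < pc A y r2 := by
        have h1' := pc_mono A y (show left ≤ r2 by omega)
        omega
      have hlr2 : left < r2 := by
        by_contra hc
        have := pc_mono A x (show r2 ≤ left by omega)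
        omega
      have hnone : ∀ r, r < r2 → ¬(pc A x left < pc A x r ∧ pc A y left < pc A y r) := by
        intro r hr hc
        by_cases hcase : r < right
        · exact h4 r hcase hc
        · by_cases hcase2 : r < r1
          · have := o13 r (by omega) hcase2
            rw [getD_CX A x (by omega), g1] at this
            omega
          · have := o23 r (by omega) hr
            rw [getD_CX A y (by omega), g4] at this
            omega
      have hT : (Tcnt A x y left : Int) = ((A.length + 1 : Nat) : Int) - (r2 : Int) := by
        have hfe : (Finset.range (A.length + 1)).filter
            (fun r => pc A x left < pc A x r ∧ pc A y left < pc A y r) = Finset.Ico r2 (A.length + 1) := by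
          apply Finset.ext
          intro r
          rw [Finset.mem_filter, Finset.mem_range, Finset.mem_Ico]
          constructor
          · rintro ⟨hrm, hc⟩
            refine ⟨?_, hrm⟩
            by_contra hc2
            exact hnone r (by omega) hc
          · rintro ⟨hge, hrm⟩
            refine ⟨hrm, ?_, ?_⟩
            · have := pc_mono A x hge; omega
            · have := pc_mono A y hge; omega
        unfold Tcnt
        rw [hfe, Nat.card_Ico]
        push_cast [Nat.sub_add_cancel]
        omega
      have hinv : ∀ r, r < r2 → ¬(pc A x (left + 1) < pc A x r ∧ pc A y (left + 1) < pc A y r) := by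
        intro r hr hc
        have hx' := pc_mono A x (show left ≤ left + 1 by omega)
        have hy' := pc_mono A y (show left ≤ left + 1 by omega)
        exact hnone r hr (by constructor <;> omega)
      rw [ih (left + 1) r2 (res + ((CX.length : Int) - (r2 : Int))) (by omega) (by omega) (by omega) (by omega) hinv]
      rw [Finset.sum_eq_sum_Ico_succ_bot (show left < A.length + 1 by omega)]
      rw [hT, hlenX]
      push_cast
      ring

def Ucnt (A : List Int) (x y : Int) (r : Nat) : Nat :=
  ((Finset.range (A.length + 1)).filter
    (fun l => pc A x l < pc A x r ∧ pc A y l < pc A y r)).card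

theorem card_le_min (m : Nat) (d : Int) (hd : d < (m : Int)) :
    (((Finset.range m).filter (fun l : Nat => (l : Int) ≤ d)).card : Int)
    = if 0 ≤ d then d + 1 else 0 := by
  have hfe : (Finset.range m).filter (fun l : Nat => (l : Int) ≤ d) = Finset.range (d + 1).toNat := by
    apply Finset.ext
    intro l
    rw [Finset.mem_filter, Finset.mem_range, Finset.mem_range]
    omega
  rw [hfe, Finset.card_range]
  split_ifs <;> omega

theorem foldB_inv (A : List Int) (x y : Int) : ∀ k, k ≤ A.length →
    (-1 ≤ ((PySem.List.enumerate (A.take k) 0).foldl (pvStepB x y) (-1, -1, 0)).1 ∧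
      ((PySem.List.enumerate (A.take k) 0).foldl (pvStepB x y) (-1, -1, 0)).1 < (k : Int) ∧
      ∀ l : Nat, ((l : Int) ≤ ((PySem.List.enumerate (A.take k) 0).foldl (pvStepB x y) (-1, -1, 0)).1 ↔ pc A x l < pc A x k)) ∧
    (-1 ≤ ((PySem.List.enumerate (A.take k) 0).foldl (pvStepB x y) (-1, -1, 0)).2.1 ∧
      ((PySem.List.enumerate (A.take k) 0).foldl (pvStepB x y) (-1, -1, 0)).2.1 < (k : Int) ∧
      ∀ l : Nat, ((l : Int) ≤ ((PySem.List.enumerate (A.take k) 0).foldl (pvStepB x y) (-1, -1, 0)).2.1 ↔ pc A y l < pc A y k)) ∧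
    ((PySem.List.enumerate (A.take k) 0).foldl (pvStepB x y) (-1, -1, 0)).2.2
      = ∑ r ∈ Finset.range (k + 1), (Ucnt A x y r : Int) := by
  intro k
  induction k with
  | zero =>
    intro _
    refine ⟨⟨by simp [PySem.List.enumerate_nil], by simp [PySem.List.enumerate_nil], ?_⟩,
      ⟨by simp [PySem.List.enumerate_nil], by simp [PySem.List.enumerate_nil], ?_⟩, ?_⟩
    · intro l
      simp only [List.take_zero, PySem.List.enumerate_nil, List.foldl_nil]
      constructor
      · intro h; exfalso; omega
      · intro h; exfalso; have := pc_nonneg A x l; rw [pc_zero] at h; omega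
    · intro l
      simp only [List.take_zero, PySem.List.enumerate_nil, List.foldl_nil]
      constructor
      · intro h; exfalso; omega
      · intro h; exfalso; have := pc_nonneg A y l; rw [pc_zero] at h; omega
    · simp only [List.take_zero, PySem.List.enumerate_nil, List.foldl_nil]
      rw [Finset.sum_range_one]
      have : Ucnt A x y 0 = 0 := by
        unfold Ucnt
        rw [Finset.card_eq_zero, Finset.filter_eq_empty_iff]
        intro l _
        rw [pc_zero, pc_zero]
        intro hc
        have := pc_nonneg A x l
        omega
      rw [this]
      rfl
  | succ k ih =>
    intro hk
    obtain ⟨⟨hx1, hx2, hx3⟩, ⟨hy1, hy2, hy3⟩, htot⟩ := ih (by omega)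
    set s := (PySem.List.enumerate (A.take k) 0).foldl (pvStepB x y) (-1, -1, 0) with hs
    have htake : A.take (k + 1) = A.take k ++ [A.getD k 0] := by
      rw [List.getD_eq_getElem _ _ (by omega), ← List.take_concat_get (by omega), List.concat_eq_append]
    have hen : PySem.List.enumerate (A.take (k + 1)) 0
        = PySem.List.enumerate (A.take k) 0 ++ [((k : Int), A.getD k 0)] := by
      rw [htake, PySem.List.enumerate_append]
      congr 1
      rw [PySem.List.enumerate_cons, PySem.List.enumerate_nil]
      congr 2
      simp
      omega
    rw [hen, List.foldl_append, List.foldl_cons, List.foldl_nil, ← hs]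
    set a := A.getD k 0 with ha
    have hpcx : pc A x (k + 1) = pc A x k + (if a = x then 1 else 0) := pc_succ A x (by omega)
    have hpcy : pc A y (k + 1) = pc A y k + (if a = y then 1 else 0) := pc_succ A y (by omega)
    unfold pvStepB
    set lx' := if a = x then (k : Int) else s.1 with hlx
    set ly' := if a = y then (k : Int) else s.2.1 with hly
    have hxiff : ∀ l : Nat, ((l : Int) ≤ lx' ↔ pc A x l < pc A x (k + 1)) := by
      intro l
      rw [hpcx, hlx]
      split_ifs with h
      · constructor
        · intro hl; have := pc_mono A x (show l ≤ k by omega); omega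
        · intro hl; by_contra hc
          have := pc_mono A x (show k + 1 ≤ l by omega)
          rw [hpcx, if_pos h] at this
          omega
      · rw [hx3 l]; omega
    have hyiff : ∀ l : Nat, ((l : Int) ≤ ly' ↔ pc A y l < pc A y (k + 1)) := by
      intro l
      rw [hpcy, hly]
      split_ifs with h
      · constructor
        · intro hl; have := pc_mono A y (show l ≤ k by omega); omega
        · intro hl; by_contra hc
          have := pc_mono A y (show k + 1 ≤ l by omega)
          rw [hpcy, if_pos h] at this
          omega
      · rw [hy3 l]; omega
    have hlx1 : -1 ≤ lx' := by rw [hlx]; split_ifs <;> omega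
    have hlx2 : lx' < ((k + 1 : Nat) : Int) := by rw [hlx]; split_ifs <;> push_cast <;> omega
    have hly1 : -1 ≤ ly' := by rw [hly]; split_ifs <;> omega
    have hly2 : ly' < ((k + 1 : Nat) : Int) := by rw [hly]; split_ifs <;> push_cast <;> omega
    refine ⟨⟨hlx1, hlx2, hxiff⟩, ⟨hly1, hly2, hyiff⟩, ?_⟩
    have hU : (Ucnt A x y (k + 1) : Int) = if 0 ≤ lx' ∧ 0 ≤ ly' then min lx' ly' + 1 else 0 := by
      unfold Ucnt
      have hfe : (Finset.range (A.length + 1)).filter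
          (fun l => pc A x l < pc A x (k + 1) ∧ pc A y l < pc A y (k + 1))
          = (Finset.range (A.length + 1)).filter (fun l : Nat => (l : Int) ≤ min lx' ly') := by
        apply Finset.filter_congr
        intro l _
        rw [le_min_iff, hxiff l, hyiff l]
      rw [hfe, card_le_min _ _ (by push_cast; omega)]
      simp only [le_min_iff]
    rw [Finset.sum_range_succ, ← htot, hU]
    show (if 0 ≤ lx' ∧ 0 ≤ ly' then s.2.2 + (min lx' ly' + 1) else s.2.2)
        = s.2.2 + if 0 ≤ lx' ∧ 0 ≤ ly' then min lx' ly' + 1 else 0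
    split_ifs with h
    · rfl
    · simp

theorem sum_T_eq_sum_U (A : List Int) (x y : Int) :
    ∑ l ∈ Finset.range (A.length + 1), (Tcnt A x y l : Int)
    = ∑ r ∈ Finset.range (A.length + 1), (Ucnt A x y r : Int) := by
  have h : ∑ l ∈ Finset.range (A.length + 1), Tcnt A x y l
      = ∑ r ∈ Finset.range (A.length + 1), Ucnt A x y r := by
    unfold Tcnt Ucnt
    simp_rw [Finset.card_filter]
    exact Finset.sum_comm
  exact_mod_cast congrArg (Nat.cast (R := Int)) h

theorem count_eq_alt (A : List Int) (x y : Int) : count A x y = count_alt A x y := by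
  have hA : count A x y = ∑ l ∈ Finset.range (A.length + 1), (Tcnt A x y l : Int) := by
    show pvLoop ((List.range A.length).foldl pvStep2
        ((PySem.List.enumerate A 0).foldl (pvStep1 x y)
          (List.replicate (A.length + 1) (0 : Int), List.replicate (A.length + 1) (0 : Int)))).1
      ((List.range A.length).foldl pvStep2
        ((PySem.List.enumerate A 0).foldl (pvStep1 x y)
          (List.replicate (A.length + 1) (0 : Int), List.replicate (A.length + 1) (0 : Int)))).2
      0 0 0 = _
    rw [cnt_eq]
    rw [loop_spec A x y (A.length + 1) 0 0 0 (by omega) (by omega) (by omega) (by omega)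
        (by intro r hr; omega)]
    rw [← Finset.range_eq_Ico]
    ring
  have hB : count_alt A x y = ∑ r ∈ Finset.range (A.length + 1), (Ucnt A x y r : Int) := by
    unfold count_alt
    have h := (foldB_inv A x y A.length (le_refl _)).2.2
    rw [List.take_length] at h
    exact h
  rw [hA, hB, sum_T_eq_sum_U]

-- ===== VERDICT (by name: the statement is the Claim_ definition above) =====

theorem count_spec : Claim_equal_count := by
  intro A x y _
  unfold Spec_count
  exact count_eq_alt A x y
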